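-- pv_equiv track=rewrite | github.com/BCNDojos/pyDojos | GoL/vida.py | slider
-- ===== SOURCE A (Python) =====
-- def slider(posx,posy,flip=0,invertx=0,inverty=0,MAX=50):
-- 	res = [(2, 0), (3, 0), (0, 1), (1, 1), (3, 1), (4, 1), (0, 2), (1, 2), (2, 2), (3, 2), (1, 3), (2, 3)]
--
-- 	masx = max( x for x,y in res)
-- 	masy = max( y for x,y in res)
--
-- 	if flip:
-- 		res = [(y,-x+masx) for x,y in res]
--
-- 	def invx(v):
-- 		if invertx:
-- 			return masx -v
-- 		else:
-- 			return v
-- 	def invy(v):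
-- 		if inverty:
-- 			return masy -v
-- 		else:
-- 			return v
--
-- 	res = [ (
-- 				invx(x)+posx,
-- 				invy(y)+posy
-- 			) for x,y in res]
--
--
-- 	return [ (x,y) for x,y in res if x in range(0,MAX) and y in range(0,MAX) ]
-- ===== SOURCE B (Python) =====
-- # Precomputed table of the glider's 8 orientations (flip, invertx, inverty);
-- # slider just selects a pattern, translates it, and keeps in-bounds cells.
-- _PATTERNS = {
--     (False, False, False): [(2, 0), (3, 0), (0, 1), (1, 1), (3, 1), (4, 1), (0, 2), (1, 2), (2, 2), (3, 2), (1, 3), (2, 3)],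
--     (False, False, True):  [(2, 3), (3, 3), (0, 2), (1, 2), (3, 2), (4, 2), (0, 1), (1, 1), (2, 1), (3, 1), (1, 0), (2, 0)],
--     (False, True, False):  [(2, 0), (1, 0), (4, 1), (3, 1), (1, 1), (0, 1), (4, 2), (3, 2), (2, 2), (1, 2), (3, 3), (2, 3)],
--     (False, True, True):   [(2, 3), (1, 3), (4, 2), (3, 2), (1, 2), (0, 2), (4, 1), (3, 1), (2, 1), (1, 1), (3, 0), (2, 0)],
--     (True, False, False):  [(0, 2), (0, 1), (1, 4), (1, 3), (1, 1), (1, 0), (2, 4), (2, 3), (2, 2), (2, 1), (3, 3), (3, 2)],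
--     (True, False, True):   [(0, 1), (0, 2), (1, -1), (1, 0), (1, 2), (1, 3), (2, -1), (2, 0), (2, 1), (2, 2), (3, 0), (3, 1)],
--     (True, True, False):   [(4, 2), (4, 1), (3, 4), (3, 3), (3, 1), (3, 0), (2, 4), (2, 3), (2, 2), (2, 1), (1, 3), (1, 2)],
--     (True, True, True):    [(4, 1), (4, 2), (3, -1), (3, 0), (3, 2), (3, 3), (2, -1), (2, 0), (2, 1), (2, 2), (1, 0), (1, 1)],
-- }
--
-- def slider(posx, posy, flip=0, invertx=0, inverty=0, MAX=50):
--     cells = _PATTERNS[(bool(flip), bool(invertx), bool(inverty))]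
--     return [(x + posx, y + posy) for x, y in cells
--             if 0 <= x + posx < MAX and 0 <= y + posy < MAX]
-- ===== Notes on version B (the rewrite author's own statement) =====
-- stated objective: alternative
-- what changed: B replaces A's runtime transform pipeline (max scans, flip comprehension, invert/offset comprehension, filter) with a precomputed lookup table of all 8 glider orientations; at call time it only selects a pattern, translates by (posx,posy) and bounds-filters.
import Mathlib
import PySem

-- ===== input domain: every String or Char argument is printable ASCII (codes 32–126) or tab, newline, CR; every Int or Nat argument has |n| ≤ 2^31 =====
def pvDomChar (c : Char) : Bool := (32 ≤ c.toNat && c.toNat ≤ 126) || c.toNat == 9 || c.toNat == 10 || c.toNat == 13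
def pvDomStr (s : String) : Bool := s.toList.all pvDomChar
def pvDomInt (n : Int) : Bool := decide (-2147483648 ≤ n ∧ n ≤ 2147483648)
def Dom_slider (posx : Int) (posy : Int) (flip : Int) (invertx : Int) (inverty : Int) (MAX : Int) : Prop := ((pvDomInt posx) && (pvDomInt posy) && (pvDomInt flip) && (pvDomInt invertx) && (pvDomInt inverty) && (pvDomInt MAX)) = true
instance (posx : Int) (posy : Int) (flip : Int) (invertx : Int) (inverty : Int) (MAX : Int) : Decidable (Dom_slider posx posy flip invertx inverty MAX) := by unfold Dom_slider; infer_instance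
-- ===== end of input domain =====

-- B replaces A's runtime transform pipeline with a precomputed table of the 8 glider
-- orientations, selected and merely translated+bounds-filtered at call time (objective:
-- alternative); proved equal on all inputs.


-- ===== PORT A =====
-- Literal port of A: base list, max scans (max of a literal non-empty list; getD 0 never
-- takes the none branch), conditional flip map, invert/offset map, bounds filter.
def slider (posx : Int) (posy : Int) (flip : Int) (invertx : Int) (inverty : Int) (MAX : Int) : List (Int × Int) :=
  let res : List (Int × Int) := [(2, 0), (3, 0), (0, 1), (1, 1), (3, 1), (4, 1), (0, 2), (1, 2), (2, 2), (3, 2), (1, 3), (2, 3)]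
  let masx : Int := (PySem.List.max? (res.map Prod.fst) (fun v => v)).getD 0
  let masy : Int := (PySem.List.max? (res.map Prod.snd) (fun v => v)).getD 0
  let res := if flip ≠ 0 then res.map (fun p => (p.2, -p.1 + masx)) else res
  let invx : Int → Int := fun v => if invertx ≠ 0 then masx - v else v
  let invy : Int → Int := fun v => if inverty ≠ 0 then masy - v else v
  let res := res.map (fun p => (invx p.1 + posx, invy p.2 + posy))
  res.filter (fun p => decide (0 ≤ p.1 ∧ p.1 < MAX) && decide (0 ≤ p.2 ∧ p.2 < MAX))

-- ===== PORT B =====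
-- Port of B: the _PATTERNS table keyed by (bool(flip), bool(invertx), bool(inverty)).
def sliderPattern (f ix iy : Bool) : List (Int × Int) :=
  match f, ix, iy with
  | false, false, false => [(2, 0), (3, 0), (0, 1), (1, 1), (3, 1), (4, 1), (0, 2), (1, 2), (2, 2), (3, 2), (1, 3), (2, 3)]
  | false, false, true  => [(2, 3), (3, 3), (0, 2), (1, 2), (3, 2), (4, 2), (0, 1), (1, 1), (2, 1), (3, 1), (1, 0), (2, 0)]
  | false, true,  false => [(2, 0), (1, 0), (4, 1), (3, 1), (1, 1), (0, 1), (4, 2), (3, 2), (2, 2), (1, 2), (3, 3), (2, 3)]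
  | false, true,  true  => [(2, 3), (1, 3), (4, 2), (3, 2), (1, 2), (0, 2), (4, 1), (3, 1), (2, 1), (1, 1), (3, 0), (2, 0)]
  | true,  false, false => [(0, 2), (0, 1), (1, 4), (1, 3), (1, 1), (1, 0), (2, 4), (2, 3), (2, 2), (2, 1), (3, 3), (3, 2)]
  | true,  false, true  => [(0, 1), (0, 2), (1, -1), (1, 0), (1, 2), (1, 3), (2, -1), (2, 0), (2, 1), (2, 2), (3, 0), (3, 1)]
  | true,  true,  false => [(4, 2), (4, 1), (3, 4), (3, 3), (3, 1), (3, 0), (2, 4), (2, 3), (2, 2), (2, 1), (1, 3), (1, 2)]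
  | true,  true,  true  => [(4, 1), (4, 2), (3, -1), (3, 0), (3, 2), (3, 3), (2, -1), (2, 0), (2, 1), (2, 2), (1, 0), (1, 1)]

-- the comprehension body: translate a pattern cell and keep it only if in bounds
def sliderKeep (posx posy MAX : Int) (c : Int × Int) : Option (Int × Int) :=
  if (0 ≤ c.1 + posx ∧ c.1 + posx < MAX) ∧ (0 ≤ c.2 + posy ∧ c.2 + posy < MAX)
  then some (c.1 + posx, c.2 + posy) else none

def slider_alt (posx : Int) (posy : Int) (flip : Int) (invertx : Int) (inverty : Int) (MAX : Int) : List (Int × Int) :=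
  (sliderPattern (decide (flip ≠ 0)) (decide (invertx ≠ 0)) (decide (inverty ≠ 0))).filterMap (sliderKeep posx posy MAX)

-- ===== PRECONDITION & SPEC =====
def Spec_slider (posx : Int) (posy : Int) (flip : Int) (invertx : Int) (inverty : Int) (MAX : Int) (out : List (Int × Int)) : Prop := out = slider_alt posx posy flip invertx inverty MAX
instance (posx : Int) (posy : Int) (flip : Int) (invertx : Int) (inverty : Int) (MAX : Int) (out : List (Int × Int)) : Decidable (Spec_slider posx posy flip invertx inverty MAX out) := by unfold Spec_slider; infer_instance

-- ===== CLAIM (what is proved, stated in full; the proofs are below) =====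
def Claim_equal_slider : Prop := ∀ (posx : Int) (posy : Int) (flip : Int) (invertx : Int) (inverty : Int) (MAX : Int), Dom_slider posx posy flip invertx inverty MAX → Spec_slider posx posy flip invertx inverty MAX (slider posx posy flip invertx inverty MAX)

-- ===== LEMMAS AND PROOFS =====

-- B's filterMap is 'filter the translated cells' in A's shape
theorem pv_filtmap (posx posy MAX : Int) (l : List (Int × Int)) :
    l.filterMap (sliderKeep posx posy MAX) =
      (l.map (fun c => (c.1 + posx, c.2 + posy))).filter
        (fun p => decide (0 ≤ p.1 ∧ p.1 < MAX) && decide (0 ≤ p.2 ∧ p.2 < MAX)) := by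
  induction l with
  | nil => rfl
  | cons a t ih =>
    simp only [List.filterMap_cons, List.map_cons, List.filter_cons]
    by_cases h : (0 ≤ a.1 + posx ∧ a.1 + posx < MAX) ∧ (0 ≤ a.2 + posy ∧ a.2 + posy < MAX)
    · have hk : sliderKeep posx posy MAX a = some (a.1 + posx, a.2 + posy) := by
        simp [sliderKeep, h]
      have hc : (decide (0 ≤ a.1 + posx ∧ a.1 + posx < MAX) &&
          decide (0 ≤ a.2 + posy ∧ a.2 + posy < MAX)) = true := by
        simp only [Bool.and_eq_true, decide_eq_true_eq]; exact h
      rw [hk, hc, if_pos rfl, ih]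
    · have hk : sliderKeep posx posy MAX a = none := by
        simp [sliderKeep, h]
      have hc : ¬ ((decide (0 ≤ a.1 + posx ∧ a.1 + posx < MAX) &&
          decide (0 ≤ a.2 + posy ∧ a.2 + posy < MAX)) = true) := by
        simp only [Bool.and_eq_true, decide_eq_true_eq]; exact h
      rw [hk, if_neg hc, ih]

-- masx / masy of A evaluate on the literal base list
theorem pv_masx : (PySem.List.max? (([((2:Int),(0:Int)),(3,0),(0,1),(1,1),(3,1),(4,1),(0,2),(1,2),(2,2),(3,2),(1,3),(2,3)]).map Prod.fst) (fun v => v)).getD 0 = (4 : Int) := by decide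

theorem pv_masy : (PySem.List.max? (([((2:Int),(0:Int)),(3,0),(0,1),(1,1),(3,1),(4,1),(0,2),(1,2),(2,2),(3,2),(1,3),(2,3)]).map Prod.snd) (fun v => v)).getD 0 = (3 : Int) := by decide

-- ===== VERDICT (by name: the statement is the Claim_ definition above) =====
theorem slider_spec : Claim_equal_slider := by
  intro posx posy flip invertx inverty MAX _
  unfold Spec_slider slider_alt
  rw [pv_filtmap]
  simp only [slider, pv_masx, pv_masy]
  by_cases hf : flip = 0 <;> by_cases hx : invertx = 0 <;> by_cases hy : inverty = 0 <;>
    simp [hf, hx, hy, sliderPattern]
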